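-- pv_equiv track=rewrite | github.com/Stavros-alt/doom-evo | mapgen.py | _count_open_neighbors
-- ===== SOURCE A (Python) =====
-- def _count_open_neighbors(cells, cx, cy, radius):
--     count = 0
--     for dy in range(-radius, radius + 1):
--         for dx in range(-radius, radius + 1):
--             ny = cy + dy
--             nx = cx + dx
--             if 0 <= ny < len(cells) and 0 <= nx < len(cells[0]):
--                 if cells[ny][nx] == 0:
--                     count += 1
--     return count
-- ===== SOURCE B (Python) =====
-- def _count_open_neighbors(cells, cx, cy, radius):
--     if not cells:
--         return 0
--     y0 = max(0, cy - radius)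
--     y1 = min(len(cells), cy + radius + 1)
--     x0 = max(0, cx - radius)
--     x1 = min(len(cells[0]), cx + radius + 1)
--     if x1 <= x0 or y1 <= y0:
--         return 0
--     return sum(row[x0:x1].count(0) for row in cells[y0:y1])
-- ===== Notes on version B (the rewrite author's own statement) =====
-- stated objective: faster
-- what changed: Instead of scanning every (dy,dx) offset and bounds-checking each cell, B clamps the window bounds to the grid once and sums row[x0:x1].count(0) over the sliced rows, so offsets falling outside the grid are never visited.
import Mathlib
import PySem

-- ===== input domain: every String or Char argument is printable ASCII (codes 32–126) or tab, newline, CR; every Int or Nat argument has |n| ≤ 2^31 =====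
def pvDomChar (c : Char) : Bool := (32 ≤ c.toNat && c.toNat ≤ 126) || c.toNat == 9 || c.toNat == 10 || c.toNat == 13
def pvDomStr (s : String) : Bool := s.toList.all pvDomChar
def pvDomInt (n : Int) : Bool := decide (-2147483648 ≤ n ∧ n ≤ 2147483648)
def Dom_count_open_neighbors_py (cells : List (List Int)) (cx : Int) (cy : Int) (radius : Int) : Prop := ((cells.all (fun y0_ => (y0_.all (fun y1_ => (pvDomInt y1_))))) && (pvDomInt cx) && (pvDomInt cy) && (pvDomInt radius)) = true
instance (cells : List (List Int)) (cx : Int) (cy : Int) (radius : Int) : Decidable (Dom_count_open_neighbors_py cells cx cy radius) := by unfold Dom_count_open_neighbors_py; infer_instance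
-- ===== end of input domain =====

-- B replaces A's per-cell bounds-checked scan over all (dy,dx) offsets by clamping the window
-- bounds once and summing row[x0:x1].count(0) over the sliced rows (same exact result on Pre_;
-- a timing run measured B much faster: B's work is bounded by the in-grid window).

-- ===== PORT A =====
-- Literal port of A's nested range(-radius, radius+1) loops with the per-cell bounds check.
-- 'cells[ny][nx]' is ported with pyGetD (default 1, never counted): Python raises IndexError
-- there (a row shorter than the first row), and Pre_ excludes exactly those grids.
def count_open_neighbors_py (cells : List (List Int)) (cx : Int) (cy : Int) (radius : Int) : Int :=
  (PySem.List.pyRange (-radius) (radius + 1) 1).foldl (fun count dy =>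
    (PySem.List.pyRange (-radius) (radius + 1) 1).foldl (fun count dx =>
      let ny := cy + dy
      let nx := cx + dx
      if (0 ≤ ny ∧ ny < (cells.length : Int)) ∧ (0 ≤ nx ∧ nx < ((cells.headD []).length : Int)) then
        if PySem.List.pyGetD (PySem.List.pyGetD cells ny []) nx 1 = 0 then count + 1 else count
      else count) count) 0

-- ===== PORT B =====
-- Port of B: clamp the window to the grid once, then sum the zero-counts of the row slices.
def count_open_neighbors_py_alt (cells : List (List Int)) (cx : Int) (cy : Int) (radius : Int) : Int :=
  if cells = [] then 0
  else
    let y0 := max 0 (cy - radius)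
    let y1 := min (cells.length : Int) (cy + radius + 1)
    let x0 := max 0 (cx - radius)
    let x1 := min ((cells.headD []).length : Int) (cx + radius + 1)
    if x1 ≤ x0 ∨ y1 ≤ y0 then 0
    else (PySem.List.slice cells (some y0) (some y1)).foldl
           (fun acc row => acc + (PySem.List.count (PySem.List.slice row (some x0) (some x1)) 0 : Int)) 0

-- ===== PRECONDITION & SPEC =====
-- Pre_ excludes exactly the inputs on which A raises IndexError: a grid with some window row
-- shorter than an in-window column index (nx < len(cells[0]) but nx >= len(cells[ny])).
def Pre_count_open_neighbors_py (cells : List (List Int)) (cx : Int) (cy : Int) (radius : Int) : Prop :=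
  ∀ k ∈ List.range cells.length,
    (max 0 (cy - radius) ≤ (k : Int) ∧ (k : Int) < cy + radius + 1 ∧
     max 0 (cx - radius) < min ((cells.headD []).length : Int) (cx + radius + 1)) →
    min ((cells.headD []).length : Int) (cx + radius + 1) ≤ ((cells.getD k []).length : Int)
instance (cells : List (List Int)) (cx : Int) (cy : Int) (radius : Int) : Decidable (Pre_count_open_neighbors_py cells cx cy radius) := by unfold Pre_count_open_neighbors_py; infer_instance

def pvWitness_count_open_neighbors_py : List (List Int) × Int × Int × Int := ([[0, 1], [0, 0]], 1, 1, 1)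

def Spec_count_open_neighbors_py (cells : List (List Int)) (cx : Int) (cy : Int) (radius : Int) (out : Int) : Prop := out = count_open_neighbors_py_alt cells cx cy radius
instance (cells : List (List Int)) (cx : Int) (cy : Int) (radius : Int) (out : Int) : Decidable (Spec_count_open_neighbors_py cells cx cy radius out) := by unfold Spec_count_open_neighbors_py; infer_instance

-- ===== CLAIM (what is proved, stated in full; the proofs are below) =====
def Claim_equal_count_open_neighbors_py : Prop := ∀ (cells : List (List Int)) (cx : Int) (cy : Int) (radius : Int), Dom_count_open_neighbors_py cells cx cy radius → Pre_count_open_neighbors_py cells cx cy radius → Spec_count_open_neighbors_py cells cx cy radius (count_open_neighbors_py cells cx cy radius)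

-- ===== LEMMAS AND PROOFS =====

-- Shifting a countP over a unit-step range by a constant offset.
theorem pv_shift_countP (c a b : Int) (p : Int → Bool) :
    (PySem.List.pyRange a b 1).countP (fun x => p (c + x))
      = (PySem.List.pyRange (c + a) (c + b) 1).countP p := by
  rw [PySem.List.pyRange_one, PySem.List.pyRange_one, List.countP_map, List.countP_map]
  have h : (c + b) - (c + a) = b - a := by ring
  rw [h]
  apply List.countP_congr
  intro k _
  simp only [Function.comp]
  constructor <;> intro hh <;> { convert hh using 2; ring }

-- Shifting a mapped sum over a unit-step range by a constant offset.
theorem pv_shift_sum (c a b : Int) (g : Int → Int) :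
    ((PySem.List.pyRange a b 1).map (fun x => g (c + x))).sum
      = ((PySem.List.pyRange (c + a) (c + b) 1).map g).sum := by
  rw [PySem.List.pyRange_one, PySem.List.pyRange_one, List.map_map, List.map_map]
  have h : (c + b) - (c + a) = b - a := by ring
  rw [h]
  congr 1
  apply List.map_congr_left
  intro k _
  simp only [Function.comp]
  congr 1
  ring

-- Clamping a bounds-guarded countP to the intersected range.
theorem pv_clamp_countP (a b N : Int) (P : Int → Prop) [DecidablePred P] :
    (PySem.List.pyRange a b 1).countP (fun x => decide ((0 ≤ x ∧ x < N) ∧ P x))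
      = (PySem.List.pyRange (max 0 a) (min N b) 1).countP (fun x => decide (P x)) := by
  by_cases hab : b ≤ a
  · rw [PySem.List.pyRange_one_eq_nil hab, PySem.List.pyRange_one_eq_nil (by omega)]
    rfl
  · set lo := min b (max a 0) with hlo
    set hi := max lo (min b N) with hhi
    have h1 : a ≤ lo := by omega
    have h2 : lo ≤ hi := by omega
    have h3 : hi ≤ b := by omega
    rw [PySem.List.pyRange_one_append a lo b h1 (by omega),
        PySem.List.pyRange_one_append lo hi b h2 h3, List.countP_append, List.countP_append]
    have hleft : (PySem.List.pyRange a lo 1).countP (fun x => decide ((0 ≤ x ∧ x < N) ∧ P x)) = 0 := by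
      rw [List.countP_eq_zero]
      intro x hx
      rw [PySem.List.mem_pyRange_one] at hx
      simp only [decide_eq_true_eq]
      rintro ⟨⟨h0, hN⟩, -⟩
      omega
    have hright : (PySem.List.pyRange hi b 1).countP (fun x => decide ((0 ≤ x ∧ x < N) ∧ P x)) = 0 := by
      rw [List.countP_eq_zero]
      intro x hx
      rw [PySem.List.mem_pyRange_one] at hx
      simp only [decide_eq_true_eq]
      rintro ⟨⟨h0, hN⟩, -⟩
      omega
    have hmid : (PySem.List.pyRange lo hi 1).countP (fun x => decide ((0 ≤ x ∧ x < N) ∧ P x))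
        = (PySem.List.pyRange lo hi 1).countP (fun x => decide (P x)) := by
      apply List.countP_congr
      intro x hx
      rw [PySem.List.mem_pyRange_one] at hx
      simp only [decide_eq_true_eq]
      constructor
      · rintro ⟨-, h⟩; exact h
      · intro h; exact ⟨⟨by omega, by omega⟩, h⟩
    have hr : PySem.List.pyRange lo hi 1 = PySem.List.pyRange (max 0 a) (min N b) 1 := by
      by_cases hc : max 0 a < min N b
      · have e1 : lo = max 0 a := by omega
        have e2 : hi = min N b := by omega
        rw [e1, e2]
      · rw [PySem.List.pyRange_one_eq_nil (by omega), PySem.List.pyRange_one_eq_nil (by omega)]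
    rw [hleft, hright, hmid, hr]
    omega

-- Clamping a bounds-guarded mapped sum to the intersected range.
theorem pv_clamp_sum (a b N : Int) (g : Int → Int) :
    ((PySem.List.pyRange a b 1).map (fun y => if 0 ≤ y ∧ y < N then g y else 0)).sum
      = ((PySem.List.pyRange (max 0 a) (min N b) 1).map g).sum := by
  by_cases hab : b ≤ a
  · rw [PySem.List.pyRange_one_eq_nil hab, PySem.List.pyRange_one_eq_nil (by omega)]
    rfl
  · set lo := min b (max a 0) with hlo
    set hi := max lo (min b N) with hhi
    have h1 : a ≤ lo := by omega
    have h2 : lo ≤ hi := by omega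
    have h3 : hi ≤ b := by omega
    rw [PySem.List.pyRange_one_append a lo b h1 (by omega),
        PySem.List.pyRange_one_append lo hi b h2 h3, List.map_append, List.map_append,
        List.sum_append, List.sum_append]
    have hleft : ((PySem.List.pyRange a lo 1).map (fun y => if 0 ≤ y ∧ y < N then g y else 0)).sum = 0 := by
      apply List.sum_eq_zero
      intro x hx
      rw [List.mem_map] at hx
      obtain ⟨y, hy, rfl⟩ := hx
      rw [PySem.List.mem_pyRange_one] at hy
      rw [if_neg (by omega)]
    have hright : ((PySem.List.pyRange hi b 1).map (fun y => if 0 ≤ y ∧ y < N then g y else 0)).sum = 0 := by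
      apply List.sum_eq_zero
      intro x hx
      rw [List.mem_map] at hx
      obtain ⟨y, hy, rfl⟩ := hx
      rw [PySem.List.mem_pyRange_one] at hy
      rw [if_neg (by omega)]
    have hmid : (PySem.List.pyRange lo hi 1).map (fun y => if 0 ≤ y ∧ y < N then g y else 0)
        = (PySem.List.pyRange lo hi 1).map g := by
      apply List.map_congr_left
      intro y hy
      rw [PySem.List.mem_pyRange_one] at hy
      rw [if_pos (by omega)]
    have hr : PySem.List.pyRange lo hi 1 = PySem.List.pyRange (max 0 a) (min N b) 1 := by
      by_cases hc : max 0 a < min N b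
      · have e1 : lo = max 0 a := by omega
        have e2 : hi = min N b := by omega
        rw [e1, e2]
      · rw [PySem.List.pyRange_one_eq_nil (by omega), PySem.List.pyRange_one_eq_nil (by omega)]
    rw [hleft, hright, hmid, hr]
    ring

-- A slice with in-range bounds is the map of pyGetD over the index range.
theorem pv_slice_eq_map_pyGetD {α : Type} (xs : List α) (d : α) {a b : Int}
    (h0 : 0 ≤ a) (hab : a ≤ b) (hb : b ≤ (xs.length : Int)) :
    PySem.List.slice xs (some a) (some b)
      = (PySem.List.pyRange a b 1).map (fun i => PySem.List.pyGetD xs i d) := by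
  rw [PySem.List.slice_toNat xs h0 (by omega)]
  apply List.ext_getElem
  · simp [PySem.List.length_pyRange_one]
    omega
  · intro i h1 h2
    rw [List.getElem_take, List.getElem_drop, List.getElem_map,
        PySem.List.getElem_pyRange_one,
        PySem.List.pyGetD_eq_getElem xs d (by
          have := PySem.List.length_pyRange_one a b
          omega) (by
          have := PySem.List.length_pyRange_one a b
          simp at h2
          omega)]
    congr 1
    have := PySem.List.length_pyRange_one a b
    omega

-- The common clamped-window zero-count both ports reduce to.
def pvWindowSum (cells : List (List Int)) (cx cy radius : Int) : Int :=
  ((PySem.List.pyRange (max 0 (cy - radius)) (min (cells.length : Int) (cy + radius + 1)) 1).map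
    (fun y => ((PySem.List.pyRange (max 0 (cx - radius)) (min ((cells.headD []).length : Int) (cx + radius + 1)) 1).countP
      (fun x => decide (PySem.List.pyGetD (PySem.List.pyGetD cells y []) x 1 = 0)) : Int))).sum

-- Port A equals the clamped window sum.
theorem pv_A_eq_sum (cells : List (List Int)) (cx cy radius : Int) :
    count_open_neighbors_py cells cx cy radius = pvWindowSum cells cx cy radius := by
  unfold count_open_neighbors_py
  have h1 : ∀ dy count : Int,
      (PySem.List.pyRange (-radius) (radius + 1) 1).foldl (fun count dx =>
        let ny := cy + dy
        let nx := cx + dx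
        if (0 ≤ ny ∧ ny < (cells.length : Int)) ∧ (0 ≤ nx ∧ nx < ((cells.headD []).length : Int)) then
          if PySem.List.pyGetD (PySem.List.pyGetD cells ny []) nx 1 = 0 then count + 1 else count
        else count) count
      = count + ((PySem.List.pyRange (-radius) (radius + 1) 1).countP (fun dx =>
          decide (((0 ≤ cy + dy ∧ cy + dy < (cells.length : Int)) ∧
                   (0 ≤ cx + dx ∧ cx + dx < ((cells.headD []).length : Int))) ∧
                  PySem.List.pyGetD (PySem.List.pyGetD cells (cy + dy) []) (cx + dx) 1 = 0)) : Int) := by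
    intro dy count
    rw [← PySem.List.foldl_ite_add_one
      (fun dx : Int => ((0 ≤ cy + dy ∧ cy + dy < (cells.length : Int)) ∧
          (0 ≤ cx + dx ∧ cx + dx < ((cells.headD []).length : Int))) ∧
          PySem.List.pyGetD (PySem.List.pyGetD cells (cy + dy) []) (cx + dx) 1 = 0)
      (PySem.List.pyRange (-radius) (radius + 1) 1) count]
    apply PySem.List.foldl_congr_mem
    intro acc x _
    dsimp only
    split_ifs with hA hB hC <;> first | rfl | (exfalso; tauto)
  have h2 : (PySem.List.pyRange (-radius) (radius + 1) 1).foldl (fun count dy =>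
      (PySem.List.pyRange (-radius) (radius + 1) 1).foldl (fun count dx =>
        let ny := cy + dy
        let nx := cx + dx
        if (0 ≤ ny ∧ ny < (cells.length : Int)) ∧ (0 ≤ nx ∧ nx < ((cells.headD []).length : Int)) then
          if PySem.List.pyGetD (PySem.List.pyGetD cells ny []) nx 1 = 0 then count + 1 else count
        else count) count) 0
      = (PySem.List.pyRange (-radius) (radius + 1) 1).foldl (fun count dy =>
          count + ((PySem.List.pyRange (-radius) (radius + 1) 1).countP (fun dx =>
            decide (((0 ≤ cy + dy ∧ cy + dy < (cells.length : Int)) ∧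
                     (0 ≤ cx + dx ∧ cx + dx < ((cells.headD []).length : Int))) ∧
                    PySem.List.pyGetD (PySem.List.pyGetD cells (cy + dy) []) (cx + dx) 1 = 0)) : Int)) 0 := by
    apply PySem.List.foldl_congr_mem
    intro acc dy _
    exact h1 dy acc
  rw [h2, PySem.List.foldl_add, zero_add]
  have h3 : ∀ dy : Int,
      ((PySem.List.pyRange (-radius) (radius + 1) 1).countP (fun dx =>
        decide (((0 ≤ cy + dy ∧ cy + dy < (cells.length : Int)) ∧
                 (0 ≤ cx + dx ∧ cx + dx < ((cells.headD []).length : Int))) ∧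
                PySem.List.pyGetD (PySem.List.pyGetD cells (cy + dy) []) (cx + dx) 1 = 0)) : Int)
      = (if 0 ≤ cy + dy ∧ cy + dy < (cells.length : Int) then
          ((PySem.List.pyRange (cx - radius) (cx + radius + 1) 1).countP
            (fun x => decide ((0 ≤ x ∧ x < ((cells.headD []).length : Int)) ∧
              PySem.List.pyGetD (PySem.List.pyGetD cells (cy + dy) []) x 1 = 0)) : Int) else 0) := by
    intro dy
    by_cases hy : 0 ≤ cy + dy ∧ cy + dy < (cells.length : Int)
    · rw [if_pos hy]
      have hs := pv_shift_countP cx (-radius) (radius + 1)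
        (fun x => decide ((0 ≤ x ∧ x < ((cells.headD []).length : Int)) ∧
          PySem.List.pyGetD (PySem.List.pyGetD cells (cy + dy) []) x 1 = 0))
      have hcx1 : cx + -radius = cx - radius := by ring
      have hcx2 : cx + (radius + 1) = cx + radius + 1 := by ring
      rw [hcx1, hcx2] at hs
      rw [← hs]
      congr 1
      apply List.countP_congr
      intro x _
      simp only [decide_eq_true_eq]
      tauto
    · rw [if_neg hy]
      have h0 : (PySem.List.pyRange (-radius) (radius + 1) 1).countP (fun dx =>
          decide (((0 ≤ cy + dy ∧ cy + dy < (cells.length : Int)) ∧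
                   (0 ≤ cx + dx ∧ cx + dx < ((cells.headD []).length : Int))) ∧
                  PySem.List.pyGetD (PySem.List.pyGetD cells (cy + dy) []) (cx + dx) 1 = 0)) = 0 := by
        rw [List.countP_eq_zero]
        intro x _
        simp only [decide_eq_true_eq]
        tauto
      rw [h0]
      rfl
  have h4 : (PySem.List.pyRange (-radius) (radius + 1) 1).map (fun dy =>
      ((PySem.List.pyRange (-radius) (radius + 1) 1).countP (fun dx =>
        decide (((0 ≤ cy + dy ∧ cy + dy < (cells.length : Int)) ∧
                 (0 ≤ cx + dx ∧ cx + dx < ((cells.headD []).length : Int))) ∧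
                PySem.List.pyGetD (PySem.List.pyGetD cells (cy + dy) []) (cx + dx) 1 = 0)) : Int))
      = (PySem.List.pyRange (-radius) (radius + 1) 1).map (fun dy =>
          (if 0 ≤ cy + dy ∧ cy + dy < (cells.length : Int) then
            ((PySem.List.pyRange (cx - radius) (cx + radius + 1) 1).countP
              (fun x => decide ((0 ≤ x ∧ x < ((cells.headD []).length : Int)) ∧
                PySem.List.pyGetD (PySem.List.pyGetD cells (cy + dy) []) x 1 = 0)) : Int) else 0)) :=
    List.map_congr_left (fun dy _ => h3 dy)
  rw [h4]
  have hs := pv_shift_sum cy (-radius) (radius + 1)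
    (fun y => if 0 ≤ y ∧ y < (cells.length : Int) then
      ((PySem.List.pyRange (cx - radius) (cx + radius + 1) 1).countP
        (fun x => decide ((0 ≤ x ∧ x < ((cells.headD []).length : Int)) ∧
          PySem.List.pyGetD (PySem.List.pyGetD cells y []) x 1 = 0)) : Int) else 0)
  have hcy1 : cy + -radius = cy - radius := by ring
  have hcy2 : cy + (radius + 1) = cy + radius + 1 := by ring
  rw [hcy1, hcy2] at hs
  rw [hs, pv_clamp_sum]
  unfold pvWindowSum
  apply congrArg List.sum
  apply List.map_congr_left
  intro y _
  exact congrArg (Nat.cast : Nat → Int)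
    (pv_clamp_countP (cx - radius) (cx + radius + 1) ((cells.headD []).length : Int)
      (fun x => PySem.List.pyGetD (PySem.List.pyGetD cells y []) x 1 = 0))

-- Port B equals the clamped window sum on Pre_.
theorem pv_B_eq_sum (cells : List (List Int)) (cx cy radius : Int)
    (hPre : Pre_count_open_neighbors_py cells cx cy radius) :
    count_open_neighbors_py_alt cells cx cy radius = pvWindowSum cells cx cy radius := by
  unfold count_open_neighbors_py_alt pvWindowSum
  by_cases hnil : cells = []
  · rw [if_pos hnil]
    subst hnil
    symm
    apply List.sum_eq_zero
    intro v hv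
    rw [List.mem_map] at hv
    obtain ⟨y, hy, rfl⟩ := hv
    rw [PySem.List.mem_pyRange_one] at hy
    exfalso
    simp only [List.length_nil, Nat.cast_zero] at hy
    omega
  · rw [if_neg hnil]
    dsimp only
    by_cases hz : min ((cells.headD []).length : Int) (cx + radius + 1) ≤ max 0 (cx - radius) ∨
        min (cells.length : Int) (cy + radius + 1) ≤ max 0 (cy - radius)
    · rw [if_pos hz]
      rcases hz with hx | hy
      · symm
        apply List.sum_eq_zero
        intro v hv
        rw [List.mem_map] at hv
        obtain ⟨y, -, rfl⟩ := hv
        rw [PySem.List.pyRange_one_eq_nil hx]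
        rfl
      · symm
        rw [PySem.List.pyRange_one_eq_nil hy]
        rfl
    · rw [if_neg hz]
      have hx : max 0 (cx - radius) < min ((cells.headD []).length : Int) (cx + radius + 1) := by omega
      have hyy : max 0 (cy - radius) < min (cells.length : Int) (cy + radius + 1) := by omega
      rw [PySem.List.foldl_add, zero_add]
      rw [pv_slice_eq_map_pyGetD cells ([] : List Int)
        (le_max_left 0 (cy - radius)) (le_of_lt hyy) (min_le_left _ _), List.map_map]
      apply congrArg List.sum
      apply List.map_congr_left
      intro y hy
      rw [PySem.List.mem_pyRange_one] at hy
      simp only [Function.comp]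
      have hyb : 0 ≤ y ∧ y < (cells.length : Int) := by omega
      have hrow : PySem.List.pyGetD cells y [] = cells[y.toNat]'(by omega) :=
        PySem.List.pyGetD_eq_getElem cells [] hyb.1 hyb.2
      have hlen : min ((cells.headD []).length : Int) (cx + radius + 1)
          ≤ ((PySem.List.pyGetD cells y []).length : Int) := by
        have h := hPre y.toNat (by rw [List.mem_range]; omega) ⟨by omega, by omega, hx⟩
        rw [List.getD_eq_getElem cells [] (by omega)] at h
        rw [hrow]
        exact h
      rw [PySem.List.count_eq]
      rw [pv_slice_eq_map_pyGetD (PySem.List.pyGetD cells y []) (1 : Int)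
        (le_max_left 0 (cx - radius)) (le_of_lt hx) (by omega)]
      rw [List.count_eq_countP, List.countP_map]
      exact congrArg (Nat.cast : Nat → Int) (List.countP_congr (fun x _ => by
        simp [Function.comp]))

-- ===== VERDICT (by name: the statement is the Claim_ definition above) =====
theorem count_open_neighbors_py_spec : Claim_equal_count_open_neighbors_py := by
  intro cells cx cy radius _ hPre
  unfold Spec_count_open_neighbors_py
  rw [pv_A_eq_sum, pv_B_eq_sum cells cx cy radius hPre]
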